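-- pv_equiv track=rewrite | github.com/Vergil0327/leetcode-history | 2-D Dynamic Programming/3797. Count Routes to Climb a Rectangular Grid/solution.py | numberOfRoutes
-- ===== SOURCE A (Python) =====
-- from math import isqrt
-- from typing import List
--
-- def numberOfRoutes(grid: List[str], d: int) -> int:
--     n, m = len(grid), len(grid[0])
--     mod = 10**9 + 7
--
--     # Precompute the maximum horizontal reach (W) for vertical distances 0 and 1
--     # W = floor(sqrt(d^2 - delta_r^2))
--     w0 = d # When delta_r = 0 (same row)
--     w1 = isqrt(d**2 - 1) if d >= 1 else -1 # When delta_r = 1 (row above)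
--
--     # dp0[c]: reached via UP move. dp1[c]: reached via SAME-ROW move
--     dp0 = [1 if grid[n-1][c] == '.' else 0 for c in range(m)]
--     dp1 = [0] * m
--
--     def get_sum(pref, left, right):
--         left = max(0, left)
--         right = min(m - 1, right)
--         if left > right: return 0
--         return (pref[right + 1] - pref[left]) % mod
--
--     for r in range(n - 1, -1, -1):
--         # 1. Handle SAME-ROW moves within current row 'r'
--         # (only if we didn't just move up to reach row 0, though the problem says
--         # the route ends at row 0, we can still move horizontally on row 0)
--         pref0 = [0] * (m + 1)
--         for i in range(m):
--             pref0[i+1] = (pref0[i] + dp0[i]) % mod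
--
--         for c in range(m):
--             if grid[r][c] == '.':
--                 # sum of dp0 in range [c-w0, c+w0] excluding c itself
--                 total = get_sum(pref0, c - w0, c + w0)
--                 dp1[c] = (total - dp0[c]) % mod
--             else:
--                 dp1[c] = 0
--
--         # If we are at the top row, we are done
--         if r == 0: break
--
--         # 2. Prepare for row r-1 (UP moves)
--         next_dp0 = [0] * m
--         # A move to r-1 can come from (dp0 + dp1) of row r
--         combined_curr = [(dp0[i] + dp1[i]) % mod for i in range(m)]
--         pref_combined = [0] * (m + 1)
--         for i in range(m):
--             pref_combined[i+1] = (pref_combined[i] + combined_curr[i]) % mod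
--
--         if w1 >= 0:
--             for c in range(m):
--                 if grid[r-1][c] == '.':
--                     next_dp0[c] = get_sum(pref_combined, c - w1, c + w1)
--
--         dp0 = next_dp0
--
--     # The answer is the sum of all routes that ended at row 0
--     return (sum(dp0) + sum(dp1)) % mod
-- ===== SOURCE B (Python) =====
-- from math import isqrt
-- from typing import List
--
-- def numberOfRoutes(grid: List[str], d: int) -> int:
--     # Same DP (dp0 via UP, dp1 via SAME-ROW, bottom-up), but each window sum is
--     # taken directly from a clamped slice of the dp array instead of maintaining
--     # prefix-sum arrays, and rows are walked as a reversed list of strings.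
--     n, m = len(grid), len(grid[0])
--     MOD = 10**9 + 7
--     w0 = d
--     w1 = isqrt(d * d - 1) if d >= 1 else -1
--
--     def win(arr, left, right):
--         lo = max(0, left)
--         hi = min(m - 1, right)
--         if lo > hi:
--             return 0
--         return sum(arr[lo:hi + 1]) % MOD
--
--     rows = grid[::-1]  # bottom row first
--     dp0 = [1 if ch == '.' else 0 for ch in rows[0][:m]]
--     dp1 = [0] * m
--     for k, row in enumerate(rows):
--         dp1 = [(win(dp0, c - w0, c + w0) - dp0[c]) % MOD if ch == '.' else 0
--                for c, ch in enumerate(row[:m])]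
--         if k == n - 1:
--             break
--         comb = [(a + b) % MOD for a, b in zip(dp0, dp1)]
--         above = rows[k + 1]
--         if w1 >= 0:
--             dp0 = [win(comb, c - w1, c + w1) if ch == '.' else 0
--                    for c, ch in enumerate(above[:m])]
--         else:
--             dp0 = [0] * m
--     return (sum(dp0) + sum(dp1)) % MOD
-- ===== Notes on version B (the rewrite author's own statement) =====
-- stated objective: simpler
-- what changed: B drops A's per-row prefix-sum arrays (pref0/pref_combined) and get_sum helper, summing each clamped window directly from the dp array, and walks the grid as a reversed list of rows instead of indexing rows by a countdown loop.
import Mathlib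
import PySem

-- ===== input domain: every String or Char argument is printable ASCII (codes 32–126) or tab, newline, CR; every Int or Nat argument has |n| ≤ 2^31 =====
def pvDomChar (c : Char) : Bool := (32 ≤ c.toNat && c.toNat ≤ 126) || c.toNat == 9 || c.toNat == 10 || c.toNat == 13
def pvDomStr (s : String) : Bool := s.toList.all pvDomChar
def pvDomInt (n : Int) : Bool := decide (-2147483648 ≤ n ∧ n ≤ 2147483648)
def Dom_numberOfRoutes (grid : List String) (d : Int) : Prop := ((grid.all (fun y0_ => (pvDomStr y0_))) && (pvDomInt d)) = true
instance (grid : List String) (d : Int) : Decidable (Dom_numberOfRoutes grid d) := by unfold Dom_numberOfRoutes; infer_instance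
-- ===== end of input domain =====

-- B replaces A's per-row prefix-sum arrays (pref0/pref_combined + get_sum) by direct
-- clamped-slice window sums and walks the rows as a reversed list (objective: simpler).

def pvMOD : Int := 1000000007

-- ===== PORT A =====
-- grid[r][c]; under Pre_ the indices are always in range, the default is never read
def pvCellA (grid : List String) (r c : Nat) : Char := ((grid.getD r "").toList).getD c ' '

-- the loop 'pref[i+1] = (pref[i] + dp[i]) % mod'
def pvPrefAuxA (dp : List Int) (cur : Int) : List Int :=
  match dp with
  | [] => []
  | x :: xs =>
    let cur' := PySem.Int.mod (cur + x) pvMOD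
    cur' :: pvPrefAuxA xs cur'

def pvPrefA (dp : List Int) : List Int := 0 :: pvPrefAuxA dp 0

def pvGetSumA (m : Nat) (pref : List Int) (left right : Int) : Int :=
  let l := max 0 left
  let r := min ((m : Int) - 1) right
  if l > r then 0
  else PySem.Int.mod (pref.getD (r + 1).toNat 0 - pref.getD l.toNat 0) pvMOD

-- the 'for c in range(m)' loop filling dp1 for row r (pref0 computed once per row)
def pvSameA (grid : List String) (m : Nat) (w0 : Int) (r : Nat) (dp0 : List Int) : List Int :=
  let pref0 := pvPrefA dp0
  (List.range m).map (fun c =>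
    if pvCellA grid r c = '.' then
      PySem.Int.mod (pvGetSumA m pref0 ((c : Int) - w0) ((c : Int) + w0) - dp0.getD c 0) pvMOD
    else 0)

-- combined/pref_combined and the 'if w1 >= 0' loop producing next_dp0 (for row r-1)
def pvUpA (grid : List String) (m : Nat) (w1 : Int) (r : Nat) (dp0 dp1 : List Int) : List Int :=
  let combined := (List.range m).map (fun i => PySem.Int.mod (dp0.getD i 0 + dp1.getD i 0) pvMOD)
  let pref := pvPrefA combined
  if w1 ≥ 0 then
    (List.range m).map (fun c =>
      if pvCellA grid (r - 1) c = '.' then pvGetSumA m pref ((c : Int) - w1) ((c : Int) + w1) else 0)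
  else List.replicate m 0

-- 'for r in range(n-1, -1, -1)' with the 'if r == 0: break'
def pvLoopA (grid : List String) (m : Nat) (w0 w1 : Int) : Nat → List Int → List Int × List Int
  | 0, dp0 => (dp0, pvSameA grid m w0 0 dp0)
  | r + 1, dp0 =>
    let dp1 := pvSameA grid m w0 (r + 1) dp0
    let dp0' := pvUpA grid m w1 (r + 1) dp0 dp1
    pvLoopA grid m w0 w1 r dp0'

def numberOfRoutes (grid : List String) (d : Int) : Int :=
  let n := grid.length
  let m := (grid.headD "").toList.length
  let w0 := d
  let w1 := if d ≥ 1 then Int.sqrt (d ^ 2 - 1) else -1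
  let dp0 := (List.range m).map (fun c => if pvCellA grid (n - 1) c = '.' then (1 : Int) else 0)
  if n = 0 then 0  -- guard for totality: Python raises IndexError on [] (excluded by Pre_)
  else
    let p := pvLoopA grid m w0 w1 (n - 1) dp0
    PySem.Int.mod (p.1.sum + p.2.sum) pvMOD

-- ===== PORT B =====
-- win(arr, left, right): direct sum of the clamped slice arr[lo:hi+1], mod
def pvWinB (m : Nat) (arr : List Int) (left right : Int) : Int :=
  let lo := max 0 left
  let hi := min ((m : Int) - 1) right
  if lo > hi then 0
  else PySem.Int.mod (PySem.List.slice arr (some lo) (some (hi + 1))).sum pvMOD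

-- the dp1 comprehension over enumerate(row[:m])
def pvRowB (m : Nat) (w0 : Int) (dp0 : List Int) (row : List Char) : List Int :=
  (PySem.List.enumerate (row.take m)).map (fun p =>
    if p.2 = '.' then
      PySem.Int.mod (pvWinB m dp0 (p.1 - w0) (p.1 + w0) - PySem.List.pyGetD dp0 p.1 0) pvMOD
    else 0)

-- 'for k, row in enumerate(rows)' with the break folded into the list recursion
def pvLoopB (m : Nat) (w0 w1 : Int) : List (List Char) → List Int → Int
  | [], dp0 => PySem.Int.mod dp0.sum pvMOD  -- unreachable: rows is nonempty
  | [row], dp0 =>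
    let dp1 := pvRowB m w0 dp0 row
    PySem.Int.mod (dp0.sum + dp1.sum) pvMOD
  | row :: above :: rest, dp0 =>
    let dp1 := pvRowB m w0 dp0 row
    let comb := List.zipWith (fun a b => PySem.Int.mod (a + b) pvMOD) dp0 dp1
    let dp0' :=
      if w1 ≥ 0 then
        (PySem.List.enumerate (above.take m)).map (fun p =>
          if p.2 = '.' then pvWinB m comb (p.1 - w1) (p.1 + w1) else 0)
      else List.replicate m 0
    pvLoopB m w0 w1 (above :: rest) dp0'

def numberOfRoutes_alt (grid : List String) (d : Int) : Int :=
  if grid.isEmpty then 0  -- guard for totality: Python raises IndexError on [] (excluded by Pre_)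
  else
    let m := (grid.headD "").toList.length
    let w0 := d
    let w1 := if d ≥ 1 then Int.sqrt (d * d - 1) else -1
    let rows := (grid.map String.toList).reverse  -- grid[::-1], bottom row first
    let dp0 := ((rows.headD []).take m).map (fun ch => if ch = '.' then (1 : Int) else 0)
    pvLoopB m w0 w1 rows dp0

-- ===== PRECONDITION & SPEC =====
-- Pre_ excludes exactly the inputs where A raises IndexError: the empty grid, and grids
-- where some row is shorter than row 0 (every such cell is read when m > 0).
def Pre_numberOfRoutes (grid : List String) (d : Int) : Prop :=
  grid ≠ [] ∧ ∀ s ∈ grid, (grid.headD "").toList.length ≤ s.toList.length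
instance (grid : List String) (d : Int) : Decidable (Pre_numberOfRoutes grid d) := by
  unfold Pre_numberOfRoutes; infer_instance

def pvWitness_numberOfRoutes : List String × Int := (["..#", ".#.", "..."], 2)

def Spec_numberOfRoutes (grid : List String) (d : Int) (out : Int) : Prop := out = numberOfRoutes_alt grid d
instance (grid : List String) (d : Int) (out : Int) : Decidable (Spec_numberOfRoutes grid d out) := by unfold Spec_numberOfRoutes; infer_instance

-- ===== CLAIM (what is proved, stated in full; the proofs are below) =====
def Claim_equal_numberOfRoutes : Prop := ∀ (grid : List String) (d : Int), Dom_numberOfRoutes grid d → Pre_numberOfRoutes grid d → Spec_numberOfRoutes grid d (numberOfRoutes grid d)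

-- ===== LEMMAS AND PROOFS =====

theorem pvMOD_pos : (0 : Int) < pvMOD := by norm_num [pvMOD]

theorem pvPrefAuxA_getD (dp : List Int) : ∀ (i : Nat) (s : Int), i < dp.length →
    (pvPrefAuxA dp (PySem.Int.mod s pvMOD)).getD i 0
      = PySem.Int.mod (s + (dp.take (i + 1)).sum) pvMOD := by
  induction dp with
  | nil => intro i s h; simp at h
  | cons x xs ih =>
    intro i s h
    have hmm : ∀ a : Int, PySem.Int.mod a pvMOD = a % pvMOD :=
      fun a => PySem.Int.mod_eq_emod_of_pos pvMOD_pos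
    have hkey : PySem.Int.mod (PySem.Int.mod s pvMOD + x) pvMOD
        = PySem.Int.mod (s + x) pvMOD := by
      rw [hmm, hmm, hmm, Int.emod_add_emod]
    cases i with
    | zero => simp [pvPrefAuxA, hkey]
    | succ j =>
      simp only [pvPrefAuxA, List.getD_cons_succ]
      rw [hkey, ih j (s + x) (by simpa using h)]
      simp [add_assoc]

theorem pvPrefA_getD (dp : List Int) (i : Nat) (hi : i ≤ dp.length) :
    (pvPrefA dp).getD i 0 = PySem.Int.mod ((dp.take i).sum) pvMOD := by
  have hmm : ∀ a : Int, PySem.Int.mod a pvMOD = a % pvMOD :=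
    fun a => PySem.Int.mod_eq_emod_of_pos pvMOD_pos
  cases i with
  | zero => simp [pvPrefA, hmm]
  | succ j =>
    have h := pvPrefAuxA_getD dp j 0 (by omega)
    rw [show PySem.Int.mod 0 pvMOD = 0 from by simp [hmm]] at h
    simp only [pvPrefA, List.getD_cons_succ]
    rw [h]
    simp

theorem pvSumTakeSub (dp : List Int) (a b : Nat) (hab : a ≤ b) :
    ((dp.drop a).take (b - a)).sum = (dp.take b).sum - (dp.take a).sum := by
  have : dp.take b = dp.take a ++ (dp.drop a).take (b - a) := by
    rw [← List.take_add]; congr 1; omega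
  rw [this, List.sum_append]; ring

theorem pvWindowEq (dp : List Int) (m : Nat) (hdp : dp.length = m) (l r : Int) :
    pvGetSumA m (pvPrefA dp) l r = pvWinB m dp l r := by
  have hmm : ∀ a : Int, PySem.Int.mod a pvMOD = a % pvMOD :=
    fun a => PySem.Int.mod_eq_emod_of_pos pvMOD_pos
  unfold pvGetSumA pvWinB
  set lo := max 0 l with hlo
  set hi := min ((m : Int) - 1) r with hhi
  by_cases hgt : lo > hi
  · simp [hgt]
  · simp only [hgt, if_false]
    have h0lo : 0 ≤ lo := le_max_left _ _
    have hlohi : lo ≤ hi := not_lt.mp hgt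
    have hhim : hi ≤ (m : Int) - 1 := min_le_left _ _
    set a := lo.toNat with ha
    set b := (hi + 1).toNat with hb
    have hab : a ≤ b := by omega
    have hbm : b ≤ m := by omega
    have h1 : (pvPrefA dp).getD b 0 = PySem.Int.mod ((dp.take b).sum) pvMOD :=
      pvPrefA_getD dp b (by omega)
    have h2 : (pvPrefA dp).getD a 0 = PySem.Int.mod ((dp.take a).sum) pvMOD :=
      pvPrefA_getD dp a (by omega)
    rw [h1, h2, PySem.List.slice_toNat dp h0lo (by omega), ← hb, ← ha,
      show b - a = b - a from rfl]
    rw [pvSumTakeSub dp a b hab]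
    rw [hmm, hmm, hmm, hmm, ← Int.sub_emod]

theorem pvEnumBridge (row : List Char) (m : Nat) (hm : m ≤ row.length)
    (F : Int → Char → Int) :
    (PySem.List.enumerate (row.take m)).map (fun p => F p.1 p.2)
      = (List.range m).map (fun c => F (c : Nat) (row.getD c ' ')) := by
  apply List.ext_getElem
  · simp [PySem.List.length_enumerate]; omega
  · intro c h1 h2
    have hcm : c < m := by simpa using h2
    have hlen : c < (PySem.List.enumerate (row.take m)).length := by
      simp [PySem.List.length_enumerate]; omega
    simp only [List.getElem_map, PySem.List.getElem_enumerate _ 0 c hlen, List.getElem_range]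
    have ht : (row.take m)[c]'(by simp; omega) = row[c]'(by omega) := by simp
    rw [ht, zero_add, List.getD_eq_getElem row ' ' (by omega)]

theorem pvCellA_getD (grid : List String) (r c : Nat) (hr : r < grid.length) :
    pvCellA grid r c = (grid[r].toList).getD c ' ' := by
  unfold pvCellA
  rw [List.getD_eq_getElem grid "" hr]

theorem pvRowB_eq (grid : List String) (m : Nat) (w0 : Int) (r : Nat) (dp : List Int)
    (hdp : dp.length = m) (hr : r < grid.length) (hm : m ≤ (grid[r].toList).length) :
    pvRowB m w0 dp (grid[r].toList) = pvSameA grid m w0 r dp := by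
  unfold pvRowB pvSameA
  rw [pvEnumBridge (grid[r].toList) m hm
    (fun i ch => if ch = '.' then
      PySem.Int.mod (pvWinB m dp (i - w0) (i + w0) - PySem.List.pyGetD dp i 0) pvMOD else 0)]
  apply List.map_congr_left
  intro c _
  rw [← pvCellA_getD grid r c hr, PySem.List.pyGetD_natCast, ← pvWindowEq dp m hdp]

theorem pvZipEq (dp0 dp1 : List Int) (m : Nat) (h0 : dp0.length = m) (h1 : dp1.length = m) :
    List.zipWith (fun a b => PySem.Int.mod (a + b) pvMOD) dp0 dp1
      = (List.range m).map (fun i => PySem.Int.mod (dp0.getD i 0 + dp1.getD i 0) pvMOD) := by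
  apply List.ext_getElem
  · simp [h0, h1]
  · intro i hi1 hi2
    have him : i < m := by simpa using hi2
    have hi0 : i < dp0.length := by omega
    have hii : i < dp1.length := by omega
    rw [List.getElem_zipWith, List.getElem_map, List.getElem_range,
      List.getD_eq_getElem dp0 0 hi0, List.getD_eq_getElem dp1 0 hii]

theorem pvUpB_eq (grid : List String) (m : Nat) (w1 : Int) (r : Nat) (dp0 dp1 : List Int)
    (h0 : dp0.length = m) (h1 : dp1.length = m)
    (hr : r < grid.length) (hm : m ≤ (grid[r].toList).length) :
    (if w1 ≥ 0 then
        (PySem.List.enumerate ((grid[r].toList).take m)).map (fun p =>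
          if p.2 = '.' then
            pvWinB m (List.zipWith (fun a b => PySem.Int.mod (a + b) pvMOD) dp0 dp1)
              (p.1 - w1) (p.1 + w1)
          else 0)
      else List.replicate m 0)
      = pvUpA grid m w1 (r + 1) dp0 dp1 := by
  unfold pvUpA
  by_cases hw : w1 ≥ 0
  · simp only [hw, if_true]
    rw [pvZipEq dp0 dp1 m h0 h1]
    rw [pvEnumBridge (grid[r].toList) m hm
      (fun i ch => if ch = '.' then
        pvWinB m ((List.range m).map (fun j => PySem.Int.mod (dp0.getD j 0 + dp1.getD j 0) pvMOD))
          (i - w1) (i + w1) else 0)]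
    apply List.map_congr_left
    intro c _
    have : r + 1 - 1 = r := by omega
    rw [this, ← pvCellA_getD grid r c hr, ← pvWindowEq _ m (by simp)]
  · simp [hw]

theorem pvUpA_length (grid : List String) (m : Nat) (w1 : Int) (r : Nat) (dp0 dp1 : List Int) :
    (pvUpA grid m w1 r dp0 dp1).length = m := by
  unfold pvUpA; split <;> simp

theorem pvRowsGet (grid : List String) (j : Nat) (hj : j < grid.length) :
    ((grid.map String.toList).reverse)[j]'(by simpa using hj)
      = (grid[grid.length - 1 - j]'(by omega)).toList := by
  rw [List.getElem_reverse]
  simp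

theorem pvRowsGet' (grid : List String) (j i : Nat) (hj : j < grid.length)
    (hi : i < grid.length) (hij : grid.length - 1 - j = i) :
    ((grid.map String.toList).reverse)[j]'(by simpa using hj) = (grid[i]'hi).toList := by
  rw [pvRowsGet grid j hj]
  subst hij
  rfl

theorem pvLoopEq (grid : List String) (w0 w1 : Int) (m : Nat)
    (hrows : ∀ i (h : i < grid.length), m ≤ ((grid[i]'h).toList).length) :
    ∀ (r : Nat) (dp : List Int), r < grid.length → dp.length = m →
      pvLoopB m w0 w1 (((grid.map String.toList).reverse).drop (grid.length - 1 - r)) dp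
        = PySem.Int.mod ((pvLoopA grid m w0 w1 r dp).1.sum + (pvLoopA grid m w0 w1 r dp).2.sum) pvMOD := by
  intro r
  induction r with
  | zero =>
    intro dp hr hdp
    have hlen : ((grid.map String.toList).reverse).length = grid.length := by simp
    have hd : ((grid.map String.toList).reverse).drop (grid.length - 1)
        = [(grid[0]'hr).toList] := by
      rw [List.drop_eq_getElem_cons (by simp only [List.length_reverse, List.length_map]; omega)]
      rw [List.drop_eq_nil_of_le (by simp only [List.length_reverse, List.length_map]; omega)]
      rw [pvRowsGet' grid (grid.length - 1) 0 (by omega) hr (by omega)]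
    simp only [Nat.sub_zero]
    rw [hd]
    simp only [pvLoopB, pvLoopA]
    rw [pvRowB_eq grid m w0 0 dp hdp hr (hrows 0 hr)]
  | succ r ih =>
    intro dp hr hdp
    have hrr : r < grid.length := by omega
    have hlen : ((grid.map String.toList).reverse).length = grid.length := by simp
    have hd1 : ((grid.map String.toList).reverse).drop (grid.length - 1 - (r + 1))
        = (grid[r + 1]'hr).toList
          :: ((grid.map String.toList).reverse).drop (grid.length - 1 - r) := by
      rw [List.drop_eq_getElem_cons (by simp only [List.length_reverse, List.length_map]; omega)]
      rw [pvRowsGet' grid (grid.length - 1 - (r + 1)) (r + 1) (by omega) hr (by omega)]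
      congr 2
      omega
    have hd2 : ((grid.map String.toList).reverse).drop (grid.length - 1 - r)
        = (grid[r]'hrr).toList
          :: ((grid.map String.toList).reverse).drop (grid.length - r) := by
      rw [List.drop_eq_getElem_cons (by simp only [List.length_reverse, List.length_map]; omega)]
      rw [pvRowsGet' grid (grid.length - 1 - r) r (by omega) hrr (by omega)]
      congr 2
      omega
    rw [hd1, hd2]
    simp only [pvLoopB, pvLoopA]
    rw [pvRowB_eq grid m w0 (r + 1) dp hdp hr (hrows (r + 1) hr)]
    rw [pvUpB_eq grid m w1 r dp (pvSameA grid m w0 (r + 1) dp) hdp (by simp [pvSameA]) hrr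
      (hrows r hrr)]
    rw [← hd2]
    exact ih (pvUpA grid m w1 (r + 1) dp (pvSameA grid m w0 (r + 1) dp)) hrr
      (pvUpA_length grid m w1 (r + 1) dp _)

theorem pvInitBridge (row : List Char) (m : Nat) (hm : m ≤ row.length) (f : Char → Int) :
    (row.take m).map f = (List.range m).map (fun c => f (row.getD c ' ')) := by
  apply List.ext_getElem
  · simp; omega
  · intro c h1 h2
    have hcm : c < m := by simpa using h2
    have ht : (row.take m)[c]'(by simp; omega) = row[c]'(by omega) := by simp
    simp only [List.getElem_map, List.getElem_range, ht]
    rw [List.getD_eq_getElem row ' ' (show c < row.length by omega)]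

theorem final_eq (grid : List String) (d : Int)
    (hne : grid ≠ [])
    (hall : ∀ s ∈ grid, (grid.headD "").toList.length ≤ s.toList.length) :
    numberOfRoutes grid d = numberOfRoutes_alt grid d := by
  have hn : grid.length ≠ 0 := by simpa [List.length_eq_zero_iff] using hne
  have hemp : grid.isEmpty = false := by simpa [List.isEmpty_iff] using hne
  set m := (grid.headD "").toList.length with hm
  have hrows : ∀ i (h : i < grid.length), m ≤ ((grid[i]'h).toList).length := by
    intro i h
    exact hall _ (List.getElem_mem h)
  have hw1 : (if d ≥ 1 then Int.sqrt (d ^ 2 - 1) else -1)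
      = (if d ≥ 1 then Int.sqrt (d * d - 1) else -1) := by rw [sq]
  have hrev : ((grid.map String.toList).reverse) ≠ [] := by
    simp [hne]
  have hlast : (grid.length - 1) < grid.length := by omega
  obtain ⟨h0, t0, hr⟩ : ∃ h0 t0, (grid.map String.toList).reverse = h0 :: t0 := by
    rcases hrv : (grid.map String.toList).reverse with _ | ⟨a, b⟩
    · exact absurd hrv hrev
    · exact ⟨a, b, rfl⟩
  have hq : ((grid.map String.toList).reverse)[0]?
      = some ((grid[grid.length - 1]'hlast).toList) := by
    rw [List.getElem?_eq_getElem (by simp only [List.length_reverse, List.length_map]; omega)]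
    rw [pvRowsGet' grid 0 (grid.length - 1) (by omega) hlast (by omega)]
  rw [hr] at hq
  simp only [List.getElem?_cons_zero, Option.some.injEq] at hq
  have hhead : ((grid.map String.toList).reverse).headD []
      = (grid[grid.length - 1]'hlast).toList := by
    rw [hr]
    simpa using hq
  have hinit : (((grid[grid.length - 1]'hlast).toList).take m).map
        (fun ch => if ch = '.' then (1 : Int) else 0)
      = (List.range m).map
        (fun c => if pvCellA grid (grid.length - 1) c = '.' then (1 : Int) else 0) := by
    rw [pvInitBridge _ m (hrows _ hlast) (fun ch => if ch = '.' then (1 : Int) else 0)]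
    apply List.map_congr_left
    intro c _
    rw [pvCellA_getD grid (grid.length - 1) c hlast]
  have hloop := pvLoopEq grid d (if d ≥ 1 then Int.sqrt (d ^ 2 - 1) else -1) m hrows
    (grid.length - 1)
    ((List.range m).map (fun c => if pvCellA grid (grid.length - 1) c = '.' then (1 : Int) else 0))
    hlast (by simp)
  rw [show grid.length - 1 - (grid.length - 1) = 0 from by omega, List.drop_zero] at hloop
  simp only [numberOfRoutes, numberOfRoutes_alt, hemp, Bool.false_eq_true, if_false, hn]
  rw [← hm, hhead, hinit, ← hw1, ← hloop]

-- ===== VERDICT (by name: the statement is the Claim_ definition above) =====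
theorem numberOfRoutes_spec : Claim_equal_numberOfRoutes := by
  intro grid d _ hpre
  unfold Spec_numberOfRoutes
  exact final_eq grid d hpre.1 hpre.2
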